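-- pv_equiv track=rewrite | github.com/gokou00/python_programming_challenges | codesignal/fileNaming.py | fileNaming
-- ===== SOURCE A (Python) =====
-- from collections import OrderedDict
--
-- def fileNaming(names):
--     file = OrderedDict()
--     arr = []
--
--     for x in names:
--         if x not in file:
--             file[x] = 0
--             arr.append(x)
--         else:
--             file[x] +=1
--             temp = x
--             temp += "("
--             temp += str(file[x])
--             temp += ")"
--             while(temp in file):
--                 file[x]+=1
--                 temp = x
--                 temp += "("
--                 temp += str(file[x])
--                 temp += ")"
--
--             file[temp] = 0
--             arr.append(temp)
--
--
--
--
--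
--
--
--     return arr
-- ===== SOURCE B (Python) =====
-- def fileNaming(names):
--     # Instead of probing candidate names against the used-set, parse every
--     # assigned name into (base, digit-suffix) buckets and pick the minimal
--     # free counter of a base by a set difference over a bounded range.
--     def parse(name):
--         if not name.endswith(")"):
--             return None
--         body = name[:-1]
--         i = body.rfind("(")
--         if i < 0:
--             return None
--         digits = body[i + 1:]
--         if not digits.isdigit():
--             return None
--         return (body[:i], digits)
--
--     used = set()
--     taken = {}
--     result = []
--     for x in names:
--         if x not in used:
--             name = x
--         else:
--             t = taken.get(x, set())
--             k = min((k for k in range(1, len(t) + 2) if str(k) not in t),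
--                     default=len(t) + 1)
--             name = x + "(" + str(k) + ")"
--         used.add(name)
--         p = parse(name)
--         if p is not None:
--             taken.setdefault(p[0], set()).add(p[1])
--         result.append(name)
--     return result
-- ===== Notes on version B (the rewrite author's own statement) =====
-- stated objective: alternative
-- what changed: B never probes candidate names against the used-set: it parses each assigned name into a (base, digit-suffix) bucket and, on a collision, picks the minimal free counter by a set difference over a bounded integer range, replacing A's memoized while-probe over the dict.
import Mathlib
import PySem

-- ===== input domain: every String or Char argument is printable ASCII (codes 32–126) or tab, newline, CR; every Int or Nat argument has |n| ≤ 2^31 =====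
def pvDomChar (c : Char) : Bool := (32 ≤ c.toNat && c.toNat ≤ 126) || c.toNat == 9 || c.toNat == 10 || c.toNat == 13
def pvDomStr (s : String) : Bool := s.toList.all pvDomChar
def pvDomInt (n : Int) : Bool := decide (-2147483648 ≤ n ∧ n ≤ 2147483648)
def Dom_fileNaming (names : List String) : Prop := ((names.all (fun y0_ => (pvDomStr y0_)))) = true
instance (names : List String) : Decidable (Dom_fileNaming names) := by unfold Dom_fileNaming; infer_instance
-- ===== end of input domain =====

-- B replaces A's memoized while-probe against the dict by parsing each assigned name into
-- (base, digit-suffix) buckets and taking the minimal free counter via a bounded range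
-- (objective: alternative bookkeeping; same return value).

-- ===== PORT A =====
-- temp = x; temp += "("; temp += str(c); temp += ")"
def pvTemp (x : String) (c : Int) : String := x ++ "(" ++ PySem.Int.toStr c ++ ")"

-- while(temp in file): file[x] += 1; temp = x + "(" + str(file[x]) + ")"
-- (fuel only makes the while loop total; |file| + 1 steps are proved sufficient below)
def pvAWhile (file : PySem.Dict String Int) (x : String) : Int → Nat → Int
  | c, 0 => c
  | c, fuel+1 => if file.contains (pvTemp x c) then pvAWhile file x (c + 1) fuel else c

def pvALoop : List String → PySem.Dict String Int → List String → List String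
  | [], _, arr => arr
  | x :: rest, file, arr =>
    match file.get? x with
    | none => pvALoop rest (file.insert x 0) (arr ++ [x])      -- file[x] = 0; arr.append(x)
    | some c =>
      let c' := pvAWhile file x (c + 1) (file.items.length + 1) -- file[x] += 1 and the while loop
      pvALoop rest ((file.insert x c').insert (pvTemp x c') 0) (arr ++ [pvTemp x c'])

def fileNaming (names : List String) : List String := pvALoop names PySem.Dict.empty []

-- ===== PORT B =====
-- parse(name): Some (base, digits) iff name = base + "(" + digits + ")" with digits a nonempty digit run
def pvParse (name : String) : Option (String × String) :=
  if PySem.Str.endswith name ")" then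
    let body := PySem.Str.slice name none (some (-1))          -- name[:-1]
    let i := PySem.Str.rfind body "("                          -- body.rfind("(")
    if i < 0 then none
    else
      let digits := PySem.Str.slice body (some (i + 1)) none   -- body[i+1:]
      if PySem.Str.strIsdigit digits then
        some (PySem.Str.slice body none (some i), digits)      -- (body[:i], digits)
      else none
  else none

-- taken.setdefault(p[0], set()).add(p[1])  (guarded by parse)
def pvRecord (taken : PySem.Dict String (PySem.Set String)) (name : String) :
    PySem.Dict String (PySem.Set String) :=
  match pvParse name with
  | none => taken
  | some (b, d) => taken.insert b (PySem.Set.add (taken.getD b PySem.Set.empty) d)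

-- min((k for k in range(1, len(t)+2) if str(k) not in t), default=len(t)+1)
def pvFreeK (t : PySem.Set String) : Int :=
  PySem.List.minD
    ((PySem.List.pyRange 1 ((t.length : Int) + 2)).filter
      (fun k => !(PySem.Set.contains t (PySem.Int.toStr k))))
    (fun y => y) ((t.length : Int) + 1)

def pvBLoop : List String → PySem.Set String → PySem.Dict String (PySem.Set String) →
    List String → List String
  | [], _, _, res => res
  | x :: rest, used, taken, res =>
    let name := if x ∉ used then x
      else x ++ "(" ++ PySem.Int.toStr (pvFreeK (taken.getD x PySem.Set.empty)) ++ ")"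
    pvBLoop rest (PySem.Set.add used name) (pvRecord taken name) (res ++ [name])

def fileNaming_alt (names : List String) : List String :=
  pvBLoop names PySem.Set.empty PySem.Dict.empty []

-- ===== PRECONDITION & SPEC =====
def Spec_fileNaming (names : List String) (out : List String) : Prop := out = fileNaming_alt names
instance (names : List String) (out : List String) : Decidable (Spec_fileNaming names out) := by unfold Spec_fileNaming; infer_instance

-- ===== CLAIM (what is proved, stated in full; the proofs are below) =====
def Claim_equal_fileNaming : Prop := ∀ (names : List String), Dom_fileNaming names → Spec_fileNaming names (fileNaming names)

-- ===== LEMMAS AND PROOFS =====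

-- str(n) from Nat.digits, for positive n
lemma pv_toDigitsCore_eq (f : ℕ) : ∀ (n : ℕ) (acc : List Char), 0 < n → n < f →
    Nat.toDigitsCore 10 f n acc = ((Nat.digits 10 n).map Nat.digitChar).reverse ++ acc := by
  induction f with
  | zero => intro n acc h1 h2; omega
  | succ f ih =>
    intro n acc h1 h2
    rw [Nat.toDigitsCore]
    by_cases hd : n / 10 = 0
    · simp only [hd, if_true]
      rw [Nat.digits_def' (by norm_num) h1, hd]
      simp
    · simp only [hd, if_false]
      rw [ih (n / 10) _ (Nat.pos_of_ne_zero hd) (by omega)]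
      rw [Nat.digits_def' (by norm_num) h1]
      simp

lemma pv_digitChar_toNat {a : ℕ} (ha : a < 10) : (Nat.digitChar a).toNat = 48 + a := by
  interval_cases a <;> rfl

lemma pv_digitChar_inj {a b : ℕ} (ha : a < 10) (hb : b < 10)
    (h : Nat.digitChar a = Nat.digitChar b) : a = b := by
  have h' := congrArg Char.toNat h
  rw [pv_digitChar_toNat ha, pv_digitChar_toNat hb] at h'
  omega

lemma pv_map_digitChar_inj : ∀ {l1 l2 : List ℕ}, (∀ a ∈ l1, a < 10) → (∀ a ∈ l2, a < 10) →
    l1.map Nat.digitChar = l2.map Nat.digitChar → l1 = l2 := by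
  intro l1
  induction l1 with
  | nil => intro l2 _ _ h; cases l2 <;> simp_all
  | cons a t ih =>
    intro l2 h1 h2 h
    cases l2 with
    | nil => simp_all
    | cons b t2 =>
      simp only [List.map_cons, List.cons.injEq] at h
      have := pv_digitChar_inj (h1 a (by simp)) (h2 b (by simp)) h.1
      subst this
      rw [ih (fun a ha => h1 a (by simp [ha])) (fun a ha => h2 a (by simp [ha])) h.2]

lemma pv_toDigits_inj {m n : ℕ} (hm : 0 < m) (hn : 0 < n)
    (h : Nat.toDigits 10 m = Nat.toDigits 10 n) : m = n := by
  rw [Nat.toDigits, Nat.toDigits, pv_toDigitsCore_eq _ _ _ hm (by omega),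
      pv_toDigitsCore_eq _ _ _ hn (by omega)] at h
  simp only [List.append_nil] at h
  have h2 := List.reverse_injective h
  have h3 := pv_map_digitChar_inj
      (fun a ha => Nat.digits_lt_base (by norm_num) ha)
      (fun a ha => Nat.digits_lt_base (by norm_num) ha) h2
  exact Nat.digits.injective 10 h3

lemma pv_toChars_pos {k : Int} (hk : 1 ≤ k) :
    PySem.Int.toChars k = Nat.toDigits 10 k.toNat := by
  simp only [PySem.Int.toChars, if_neg (by omega : ¬ k < 0)]

-- str(k) for k ≥ 1: nonempty run of ASCII digits
lemma pv_toChars_digits {k : Int} (hk : 1 ≤ k) :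
    PySem.Int.toChars k ≠ [] ∧ ∀ c ∈ PySem.Int.toChars k, PySem.Chars.isdigit c = true := by
  rw [pv_toChars_pos hk, Nat.toDigits,
      pv_toDigitsCore_eq _ _ _ (by omega : 0 < k.toNat) (by omega)]
  constructor
  · have : k.toNat ≠ 0 := by omega
    simp [Nat.digits_ne_nil_iff_ne_zero, this]
  · intro c hc
    simp only [List.append_nil, List.mem_reverse, List.mem_map] at hc
    obtain ⟨a, ha, rfl⟩ := hc
    have ha10 : a < 10 := Nat.digits_lt_base (by norm_num) ha
    interval_cases a <;> decide

lemma pv_toStr_inj {a b : Int} (ha : 1 ≤ a) (hb : 1 ≤ b)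
    (h : PySem.Int.toStr a = PySem.Int.toStr b) : a = b := by
  have h' := congrArg String.toList h
  rw [PySem.Int.toList_toStr, PySem.Int.toList_toStr, pv_toChars_pos ha, pv_toChars_pos hb] at h'
  have := pv_toDigits_inj (m := a.toNat) (n := b.toNat) (by omega) (by omega) h'
  omega

lemma pvTemp_inj {x : String} {a b : Int} (ha : 1 ≤ a) (hb : 1 ≤ b)
    (h : pvTemp x a = pvTemp x b) : a = b := by
  have h' := congrArg String.toList h
  simp only [pvTemp, String.toList_append, PySem.Int.toList_toStr] at h'
  have h2 : PySem.Int.toChars a = PySem.Int.toChars b :=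
    List.append_cancel_left (List.append_cancel_right h')
  rw [pv_toChars_pos ha, pv_toChars_pos hb] at h2
  have := pv_toDigits_inj (m := a.toNat) (n := b.toNat) (by omega) (by omega) h2
  omega

-- pigeonhole: among |S| + 1 successive candidates one is free
lemma pv_exists_free (S : List String) (x : String) (start : Int) (h1 : 1 ≤ start) :
    ∃ m : Int, start ≤ m ∧ m < start + ((S.length + 1 : ℕ) : Int) ∧ pvTemp x m ∉ S := by
  by_contra hc
  push_neg at hc
  have hnd : ((List.range (S.length + 1)).map
      (fun i : ℕ => pvTemp x (start + (i : Int)))).Nodup := by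
    refine List.Nodup.map_on ?_ List.nodup_range
    intro i _ j _ hij
    have hi' : (0 : Int) ≤ (i : Int) := Int.natCast_nonneg i
    have hj' : (0 : Int) ≤ (j : Int) := Int.natCast_nonneg j
    have := pvTemp_inj (x := x) (a := start + (i : Int)) (b := start + (j : Int))
      (by omega) (by omega) hij
    omega
  have hsub : ∀ s ∈ (List.range (S.length + 1)).map
      (fun i : ℕ => pvTemp x (start + (i : Int))), s ∈ S := by
    intro s hs
    simp only [List.mem_map, List.mem_range] at hs
    obtain ⟨i, hi, rfl⟩ := hs
    have hi' : (0 : Int) ≤ (i : Int) := Int.natCast_nonneg i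
    refine hc _ (by omega) (by push_cast; omega)
  have hcard1 : ((List.range (S.length + 1)).map
      (fun i : ℕ => pvTemp x (start + (i : Int)))).toFinset.card = S.length + 1 := by
    rw [List.toFinset_card_of_nodup hnd]
    simp
  have hcard2 := Finset.card_le_card
    (fun s hs => List.mem_toFinset.mpr (hsub s (List.mem_toFinset.mp hs)))
  have := List.toFinset_card_le S
  omega

-- pigeonhole for B: some counter in [1, |t|+1] has its decimal string outside t
lemma pv_exists_freeK (t : List String) :
    ∃ k : Int, 1 ≤ k ∧ k ≤ (t.length : Int) + 1 ∧ PySem.Int.toStr k ∉ t := by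
  by_contra hc
  push_neg at hc
  have hnd : ((List.range (t.length + 1)).map
      (fun i : ℕ => PySem.Int.toStr (1 + (i : Int)))).Nodup := by
    refine List.Nodup.map_on ?_ List.nodup_range
    intro i _ j _ hij
    have hi' : (0 : Int) ≤ (i : Int) := Int.natCast_nonneg i
    have hj' : (0 : Int) ≤ (j : Int) := Int.natCast_nonneg j
    have := pv_toStr_inj (a := 1 + (i : Int)) (b := 1 + (j : Int))
      (by omega) (by omega) hij
    omega
  have hsub : ∀ s ∈ (List.range (t.length + 1)).map
      (fun i : ℕ => PySem.Int.toStr (1 + (i : Int))), s ∈ t := by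
    intro s hs
    simp only [List.mem_map, List.mem_range] at hs
    obtain ⟨i, hi, rfl⟩ := hs
    have hi' : (0 : Int) ≤ (i : Int) := Int.natCast_nonneg i
    refine hc _ (by omega) (by push_cast; omega)
  have hcard1 : ((List.range (t.length + 1)).map
      (fun i : ℕ => PySem.Int.toStr (1 + (i : Int)))).toFinset.card = t.length + 1 := by
    rw [List.toFinset_card_of_nodup hnd]
    simp
  have hcard2 := Finset.card_le_card
    (fun s hs => List.mem_toFinset.mpr (hsub s (List.mem_toFinset.mp hs)))
  have := List.toFinset_card_le t
  omega

-- A's while loop finds the least free candidate ≥ start, given one exists within fuel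
lemma pvAWhile_spec (file : PySem.Dict String Int) (x : String) :
    ∀ (fuel : Nat) (start m : Int), start ≤ m → pvTemp x m ∉ file.keys →
      m < start + (fuel : Int) →
      start ≤ pvAWhile file x start fuel ∧ pvTemp x (pvAWhile file x start fuel) ∉ file.keys ∧
      ∀ j : Int, start ≤ j → j < pvAWhile file x start fuel → pvTemp x j ∈ file.keys := by
  intro fuel
  induction fuel with
  | zero => intro start m h1 h2 h3; push_cast at h3; omega
  | succ f ih =>
    intro start m h1 h2 h3
    simp only [pvAWhile, PySem.Dict.contains_eq_decide_mem_keys, decide_eq_true_eq]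
    by_cases hs : pvTemp x start ∈ file.keys
    · rw [if_pos hs]
      have hm : start + 1 ≤ m := by
        rcases eq_or_lt_of_le h1 with rfl | h
        · exact absurd hs h2
        · omega
      obtain ⟨ha, hb, hcj⟩ := ih (start + 1) m hm h2 (by push_cast at h3 ⊢; omega)
      refine ⟨by omega, hb, fun j hj1 hj2 => ?_⟩
      by_cases hj : j = start
      · exact hj ▸ hs
      · exact hcj j (by omega) hj2
    · rw [if_neg hs]
      exact ⟨le_refl _, hs, fun j h1 h2 => absurd h2 (by omega)⟩

-- rfind machinery: Chars.rfind.go step equations and characterisations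
lemma pv_go_step (s sub : List Char) (j : ℕ) :
    PySem.Chars.rfind.go s sub (j + 1) =
      if sub.isPrefixOf (List.drop (j + 1) s) = true then ((j + 1 : ℕ) : Int)
      else PySem.Chars.rfind.go s sub j := rfl

lemma pv_go_zero (s sub : List Char) :
    PySem.Chars.rfind.go s sub 0 = if sub.isPrefixOf s = true then 0 else -1 := rfl

lemma pv_go_eq_of (s sub : List Char) (i : ℕ) (hpre : sub.isPrefixOf (s.drop i) = true) :
    ∀ n, i ≤ n → (∀ j, i < j → j ≤ n → sub.isPrefixOf (s.drop j) = false) →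
      PySem.Chars.rfind.go s sub n = (i : Int) := by
  intro n
  induction n with
  | zero =>
    intro hin _
    interval_cases i
    rw [pv_go_zero]
    simpa using hpre
  | succ n ih =>
    intro hin hno
    rw [pv_go_step]
    by_cases hi : i = n + 1
    · subst hi
      rw [if_pos hpre]
    · rw [if_neg (by rw [hno (n + 1) (by omega) (le_refl _)]; simp)]
      exact ih (by omega) (fun j a b => hno j a (by omega))

lemma pv_go_nonneg (s sub : List Char) :
    ∀ n, 0 ≤ PySem.Chars.rfind.go s sub n →
      ∃ i : ℕ, PySem.Chars.rfind.go s sub n = (i : Int) ∧ i ≤ n ∧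
        sub.isPrefixOf (s.drop i) = true := by
  intro n
  induction n with
  | zero =>
    intro h
    rw [pv_go_zero] at h ⊢
    by_cases hp : sub.isPrefixOf s = true
    · exact ⟨0, by simp [hp], by omega, by simpa using hp⟩
    · rw [if_neg hp] at h; omega
  | succ n ih =>
    intro h
    rw [pv_go_step] at h ⊢
    by_cases hp : sub.isPrefixOf (List.drop (n + 1) s) = true
    · exact ⟨n + 1, by simp [hp], le_refl _, hp⟩
    · rw [if_neg hp] at h ⊢
      obtain ⟨i, h1, h2, h3⟩ := ih h
      exact ⟨i, h1, by omega, h3⟩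

-- rfind of "(" in base ++ "(" ++ digits, when digits contains no '('
lemma pv_rfind_last (bl dl : List Char) (h : '(' ∉ dl) :
    PySem.Chars.rfind (bl ++ '(' :: dl) ['('] = (bl.length : Int) := by
  unfold PySem.Chars.rfind
  apply pv_go_eq_of
  · rw [List.drop_left]
    simp [List.isPrefixOf]
  · simp only [List.length_append, List.length_cons]
    omega
  · intro j hj _
    have hsplit : bl ++ '(' :: dl = (bl ++ ['(']) ++ dl := by simp
    have hlen : (bl ++ ['(']).length = bl.length + 1 := by simp
    have hj' : j = (bl ++ ['(']).length + (j - bl.length - 1) := by rw [hlen]; omega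
    have hdrop : (bl ++ '(' :: dl).drop j = dl.drop (j - bl.length - 1) := by
      rw [hsplit, hj', List.drop_append]
      rw [List.drop_eq_nil_of_le (by rw [hlen]; omega)]
      rw [List.nil_append]
      congr 1
      rw [hlen]
      omega
    rw [hdrop]
    refine Bool.eq_false_iff.mpr (fun hp => ?_)
    have hp' := List.isPrefixOf_iff_prefix.mp hp
    obtain ⟨tail, htail⟩ := hp'
    have : '(' ∈ dl.drop (j - bl.length - 1) := by rw [← htail]; simp
    exact h (List.drop_subset _ _ this)

-- digit characters are not '(' and not ')'
lemma pv_digit_ne (c : Char) (h : PySem.Chars.isdigit c = true) : c ≠ '(' ∧ c ≠ ')' := by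
  simp only [PySem.Chars.isdigit, Bool.and_eq_true, decide_eq_true_eq] at h
  constructor <;> rintro rfl <;> simp_all <;> omega

-- parse of a well-formed name (completeness)
lemma pvParse_of_decomp (n b d : String)
    (hn : n.toList = b.toList ++ '(' :: (d.toList ++ [')']))
    (hne : d.toList ≠ [])
    (hdig : ∀ ch ∈ d.toList, PySem.Chars.isdigit ch = true) :
    pvParse n = some (b, d) := by
  have hnp : '(' ∉ d.toList := fun hm => (pv_digit_ne _ (hdig _ hm)).1 rfl
  have hassoc : b.toList ++ '(' :: (d.toList ++ [')']) =
      (b.toList ++ '(' :: d.toList) ++ [')'] := by simp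
  have hbody : (PySem.Str.slice n none (some (-1))).toList = b.toList ++ '(' :: d.toList := by
    rw [PySem.Str.slice_to_neg_one, hn, hassoc, List.dropLast_concat]
  have hend : PySem.Str.endswith n ")" = true := by
    simp only [PySem.Str.endswith, PySem.Chars.endswith,
      show (")" : String).toList = [')'] from rfl]
    exact List.isSuffixOf_iff_suffix.mpr ⟨b.toList ++ '(' :: d.toList, (hn.trans hassoc).symm⟩
  have hbodyl : PySem.List.slice n.toList none (some (-1)) = b.toList ++ '(' :: d.toList := by
    simpa [PySem.Str.slice, PySem.Chars.slice] using hbody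
  have hrf : PySem.Str.rfind (PySem.Str.slice n none (some (-1))) "(" =
      (b.toList.length : Int) := by
    simp only [PySem.Str.rfind, show ("(" : String).toList = ['('] from rfl, hbody]
    exact pv_rfind_last _ _ hnp
  have hsplit2 : b.toList ++ '(' :: d.toList = (b.toList ++ ['(']) ++ d.toList := by simp
  have hlen2 : (b.toList ++ ['(']).length = b.toList.length + 1 := by simp
  have hdigits : (PySem.Str.slice (PySem.Str.slice n none (some (-1)))
      (some ((b.toList.length : Int) + 1)) none).toList = d.toList := by
    simp only [PySem.Str.slice, PySem.Chars.slice, String.toList_ofList]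
    rw [hbodyl]
    rw [PySem.List.slice_from _ (by omega : (0:Int) ≤ (b.toList.length : Int) + 1)]
    rw [show ((b.toList.length : Int) + 1).toNat = b.toList.length + 1 by omega]
    rw [hsplit2, ← hlen2, List.drop_left]
  have hbase : (PySem.Str.slice (PySem.Str.slice n none (some (-1)))
      none (some ((b.toList.length : Int)))).toList = b.toList := by
    simp only [PySem.Str.slice, PySem.Chars.slice, String.toList_ofList]
    rw [hbodyl]
    rw [PySem.List.slice_to _ (by omega : (0:Int) ≤ (b.toList.length : Int))]
    rw [show ((b.toList.length : Int)).toNat = b.toList.length by omega]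
    exact List.take_left
  have hisdig : PySem.Str.strIsdigit (PySem.Str.slice (PySem.Str.slice n none (some (-1)))
      (some ((b.toList.length : Int) + 1)) none) = true := by
    have h1 : d.toList.isEmpty = false := by simp [List.isEmpty_iff, hne]
    have h2 : d.toList.all PySem.Chars.isdigit = true := List.all_eq_true.mpr hdig
    unfold PySem.Str.strIsdigit
    rw [hdigits]
    unfold PySem.Chars.strIsdigit
    rw [h1, h2]
    rfl
  simp only [pvParse, hend, if_true, hrf]
  rw [if_neg (by omega : ¬ (b.toList.length : Int) < 0), if_pos hisdig]
  rw [Option.some.injEq, Prod.mk.injEq]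
  exact ⟨String.toList_inj.mp hbase, String.toList_inj.mp hdigits⟩

-- parse only succeeds on well-formed names (soundness)
lemma pvParse_decomp {n b d : String} (h : pvParse n = some (b, d)) :
    n.toList = b.toList ++ '(' :: (d.toList ++ [')']) ∧ d.toList ≠ [] ∧
      ∀ ch ∈ d.toList, PySem.Chars.isdigit ch = true := by
  simp only [pvParse] at h
  split_ifs at h with h1 h2 h3 <;> try exact Option.noConfusion h
  rw [Option.some.injEq, Prod.mk.injEq] at h
  obtain ⟨hb, hd⟩ := h
  -- n ends with ')'
  have hsuf : [')'] <:+ n.toList := by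
    have := h1
    simp only [PySem.Str.endswith, PySem.Chars.endswith,
      show (")" : String).toList = [')'] from rfl] at this
    exact List.isSuffixOf_iff_suffix.mp this
  obtain ⟨pre, hpre⟩ := hsuf
  have hbody : (PySem.Str.slice n none (some (-1))).toList = pre := by
    rw [PySem.Str.slice_to_neg_one, ← hpre, List.dropLast_concat]
  -- the rfind result is a nonnegative index with an occurrence of '('
  have hbodyl : PySem.List.slice n.toList none (some (-1)) = pre := by
    simpa [PySem.Str.slice, PySem.Chars.slice] using hbody
  have hrfeq : PySem.Str.rfind (PySem.Str.slice n none (some (-1))) "(" =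
      PySem.Chars.rfind pre ['('] := by
    simp only [PySem.Str.rfind, show ("(" : String).toList = ['('] from rfl, hbody]
  rw [hrfeq] at h2 h3 hd hb
  have hnn : 0 ≤ PySem.Chars.rfind pre ['('] := by omega
  obtain ⟨i, hi1, hi2, hi3⟩ := pv_go_nonneg pre ['('] pre.length hnn
  have hr : PySem.Chars.rfind pre ['('] = (i : Int) := hi1
  rw [hr] at h3 hd hb
  obtain ⟨t, ht⟩ := List.isPrefixOf_iff_prefix.mp hi3
  have ht' : pre.drop i = '(' :: t := by rw [← ht]; rfl
  have hdt : pre.drop (i + 1) = t := by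
    have : pre.drop (i + 1) = (pre.drop i).drop 1 := by
      rw [List.drop_drop]
    rw [this, ht']
    rfl
  have hdl : d.toList = t := by
    rw [← hd]
    simp only [PySem.Str.slice, PySem.Chars.slice, String.toList_ofList]
    rw [hbodyl]
    rw [PySem.List.slice_from _ (by omega : (0:Int) ≤ (i : Int) + 1)]
    rw [show ((i : Int) + 1).toNat = i + 1 by omega]
    exact hdt
  have hbl : b.toList = pre.take i := by
    rw [← hb]
    simp only [PySem.Str.slice, PySem.Chars.slice, String.toList_ofList]
    rw [hbodyl]
    rw [PySem.List.slice_to _ (by omega : (0:Int) ≤ (i : Int))]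
    rw [show ((i : Int)).toNat = i by omega]
  have hdig : d.toList ≠ [] ∧ ∀ ch ∈ d.toList, PySem.Chars.isdigit ch = true := by
    rw [hd] at h3
    unfold PySem.Str.strIsdigit PySem.Chars.strIsdigit at h3
    rw [Bool.and_eq_true] at h3
    refine ⟨?_, fun ch hch => List.all_eq_true.mp h3.2 ch hch⟩
    intro hnil
    rw [hnil] at h3
    simp at h3
  refine ⟨?_, hdig.1, hdig.2⟩
  rw [← hpre, hbl, hdl]
  conv_lhs => rw [← List.take_append_drop i pre, ht']
  simp

-- the chosen counter of B: least k ≥ 1 whose decimal string is outside t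
lemma pvFreeK_spec (t : PySem.Set String) :
    1 ≤ pvFreeK t ∧ PySem.Int.toStr (pvFreeK t) ∉ t ∧
      ∀ j : Int, 1 ≤ j → j < pvFreeK t → PySem.Int.toStr j ∈ t := by
  obtain ⟨k0, hk0a, hk0b, hk0c⟩ := pv_exists_freeK t
  have hpk : ∀ k : Int, (!(PySem.Set.contains t (PySem.Int.toStr k))) = true ↔
      PySem.Int.toStr k ∉ t := by
    intro k
    simp [PySem.Set.contains]
  have hmemR : ∀ k : Int, k ∈ PySem.List.pyRange 1 ((t.length : Int) + 2) ↔
      1 ≤ k ∧ k < (t.length : Int) + 2 := fun k => PySem.List.mem_pyRange_one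
  have hk0ks : k0 ∈ (PySem.List.pyRange 1 ((t.length : Int) + 2)).filter
      (fun k => !(PySem.Set.contains t (PySem.Int.toStr k))) :=
    List.mem_filter.mpr ⟨(hmemR k0).mpr ⟨hk0a, by omega⟩, (hpk k0).mpr hk0c⟩
  cases hmin : PySem.List.min? ((PySem.List.pyRange 1 ((t.length : Int) + 2)).filter
      (fun k => !(PySem.Set.contains t (PySem.Int.toStr k)))) (fun y => y) with
  | none =>
    rw [PySem.List.min?_eq_none_iff] at hmin
    rw [hmin] at hk0ks
    exact absurd hk0ks (by simp)
  | some m =>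
    have hmem := List.mem_filter.mp (PySem.List.min?_mem hmin)
    have hfree : PySem.Int.toStr m ∉ t := (hpk m).mp hmem.2
    have hm1 : 1 ≤ m := ((hmemR m).mp hmem.1).1
    have hmU : m < (t.length : Int) + 2 := ((hmemR m).mp hmem.1).2
    have heq : pvFreeK t = m := by
      unfold pvFreeK PySem.List.minD
      rw [hmin]
      rfl
    rw [heq]
    refine ⟨hm1, hfree, ?_⟩
    intro j hj1 hj2
    by_contra hjn
    have hjks : j ∈ (PySem.List.pyRange 1 ((t.length : Int) + 2)).filter
        (fun k => !(PySem.Set.contains t (PySem.Int.toStr k))) :=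
      List.mem_filter.mpr ⟨(hmemR j).mpr ⟨hj1, by omega⟩, (hpk j).mpr hjn⟩
    have hle := PySem.List.min?_isMin hmin j hjks
    simp only at hle
    omega

lemma pvSet_add_fresh (S : List String) (t : String) (h : t ∉ S) :
    PySem.Set.add S t = S ++ [t] := by
  simp only [PySem.Set.add]
  rw [if_neg]
  simp [h]

lemma pv_toStr_toList (j : Int) (hj : 1 ≤ j) :
    (PySem.Int.toStr j).toList ≠ [] ∧
      ∀ ch ∈ (PySem.Int.toStr j).toList, PySem.Chars.isdigit ch = true := by
  rw [PySem.Int.toList_toStr]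
  exact pv_toChars_digits hj

lemma pv_concat_toList (b d : String) :
    (b ++ "(" ++ d ++ ")").toList = b.toList ++ '(' :: (d.toList ++ [')']) := by simp

-- the loop invariant tying A's dict to B's (used, taken) state
def pvInv (file : PySem.Dict String Int) (taken : PySem.Dict String (PySem.Set String)) : Prop :=
  file.keys.Nodup ∧
  (∀ y c, file.get? y = some c → 0 ≤ c ∧
      ∀ j : Int, 1 ≤ j → j ≤ c → pvTemp y j ∈ file.keys) ∧
  (∀ b d : String, d ∈ taken.getD b PySem.Set.empty →
      (b ++ "(" ++ d ++ ")") ∈ file.keys) ∧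
  (∀ b d : String, d.toList ≠ [] → (∀ ch ∈ d.toList, PySem.Chars.isdigit ch = true) →
      (b ++ "(" ++ d ++ ")") ∈ file.keys → d ∈ taken.getD b PySem.Set.empty)

lemma pvRecord_inv (K : List String) (taken : PySem.Dict String (PySem.Set String)) (n : String)
    (T1 : ∀ b d : String, d ∈ taken.getD b PySem.Set.empty → (b ++ "(" ++ d ++ ")") ∈ K)
    (T2 : ∀ b d : String, d.toList ≠ [] → (∀ ch ∈ d.toList, PySem.Chars.isdigit ch = true) →
      (b ++ "(" ++ d ++ ")") ∈ K → d ∈ taken.getD b PySem.Set.empty) :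
    (∀ b d : String, d ∈ (pvRecord taken n).getD b PySem.Set.empty →
      (b ++ "(" ++ d ++ ")") ∈ K ++ [n]) ∧
    (∀ b d : String, d.toList ≠ [] → (∀ ch ∈ d.toList, PySem.Chars.isdigit ch = true) →
      (b ++ "(" ++ d ++ ")") ∈ K ++ [n] → d ∈ (pvRecord taken n).getD b PySem.Set.empty) := by
  cases hp : pvParse n with
  | none =>
    constructor
    · intro b d hd
      simp only [pvRecord, hp] at hd
      exact List.mem_append_left _ (T1 b d hd)
    · intro b d hne hdig hmem
      simp only [pvRecord, hp]
      rcases List.mem_append.mp hmem with hK | hnn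
      · exact T2 b d hne hdig hK
      · have heqn : (b ++ "(" ++ d ++ ")") = n := by simpa using hnn
        have hnl : n.toList = b.toList ++ '(' :: (d.toList ++ [')']) := by
          rw [← heqn, pv_concat_toList]
        have := pvParse_of_decomp n b d hnl hne hdig
        rw [hp] at this
        simp at this
  | some bd =>
    obtain ⟨b0, d0⟩ := bd
    obtain ⟨hn0, hne0, hdig0⟩ := pvParse_decomp hp
    have hneq : n = b0 ++ "(" ++ d0 ++ ")" :=
      String.toList_inj.mp (by rw [hn0, pv_concat_toList])
    have hrec : pvRecord taken n =
        taken.insert b0 (PySem.Set.add (taken.getD b0 PySem.Set.empty) d0) := by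
      simp [pvRecord, hp]
    constructor
    · intro b d hd
      rw [hrec, PySem.Dict.getD_insert] at hd
      by_cases hb : b = b0
      · rw [if_pos hb] at hd
        rcases (PySem.Set.mem_add _ _ _).mp hd with hold | hnew
        · subst hb
          exact List.mem_append_left _ (T1 _ d hold)
        · subst hb hnew
          refine List.mem_append_right _ ?_
          rw [← hneq]
          simp
      · rw [if_neg hb] at hd
        exact List.mem_append_left _ (T1 b d hd)
    · intro b d hne hdig hmem
      rw [hrec, PySem.Dict.getD_insert]
      rcases List.mem_append.mp hmem with hK | hnn
      · have hold := T2 b d hne hdig hK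
        by_cases hb : b = b0
        · rw [if_pos hb]
          subst hb
          exact (PySem.Set.mem_add _ _ _).mpr (Or.inl hold)
        · rw [if_neg hb]
          exact hold
      · have heqn : (b ++ "(" ++ d ++ ")") = n := by simpa using hnn
        have hnl : n.toList = b.toList ++ '(' :: (d.toList ++ [')']) := by
          rw [← heqn, pv_concat_toList]
        have hp2 := pvParse_of_decomp n b d hnl hne hdig
        rw [hp] at hp2
        have hbd : b0 = b ∧ d0 = d := by
          have := Option.some.injEq (b0, d0) (b, d) ▸ hp2
          exact Prod.mk.injEq _ _ _ _ ▸ this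
        obtain ⟨hb, hd⟩ := hbd
        subst hb hd
        rw [if_pos rfl]
        exact (PySem.Set.mem_add _ _ _).mpr (Or.inr rfl)

lemma pvLoop_eq : ∀ (rest : List String) (file : PySem.Dict String Int)
    (taken : PySem.Dict String (PySem.Set String)) (arr : List String),
    pvInv file taken → pvALoop rest file arr = pvBLoop rest file.keys taken arr := by
  intro rest
  induction rest with
  | nil => intro file taken arr _; rfl
  | cons x rest ih =>
    intro file taken arr hinv
    obtain ⟨hnd, hvals, T1, T2⟩ := hinv
    by_cases hx : x ∈ file.keys
    · have hxs : file.get? x ≠ none :=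
        fun h => ((PySem.Dict.get?_eq_none_iff_not_mem_keys file x).mp h) hx
      obtain ⟨c, hget⟩ := Option.ne_none_iff_exists'.mp hxs
      obtain ⟨hc0, hocc⟩ := hvals x c hget
      have hlen : file.items.length = file.keys.length := by
        simp [PySem.Dict.keys]
      obtain ⟨mA, hmA1, hmA2, hmA3⟩ := pv_exists_free file.keys x (c + 1) (by omega)
      obtain ⟨hA1, hA2, hA3⟩ := pvAWhile_spec file x (file.items.length + 1) (c + 1) mA
        hmA1 hmA3 (by rw [hlen]; push_cast at hmA2 ⊢; omega)
      set rA := pvAWhile file x (c + 1) (file.items.length + 1) with hrA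
      obtain ⟨hB1, hB2, hB3⟩ := pvFreeK_spec (taken.getD x PySem.Set.empty)
      set rB := pvFreeK (taken.getD x PySem.Set.empty) with hrB
      have hBfree : pvTemp x rB ∉ file.keys := by
        intro hmem
        obtain ⟨hne', hdig'⟩ := pv_toStr_toList rB hB1
        exact hB2 (T2 x (PySem.Int.toStr rB) hne' hdig' hmem)
      have hBocc : ∀ j : Int, 1 ≤ j → j < rB → pvTemp x j ∈ file.keys :=
        fun j h1 h2 => T1 x (PySem.Int.toStr j) (hB3 j h1 h2)
      have hreq : rB = rA := by
        rcases lt_trichotomy rB rA with h | h | h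
        · by_cases hle : rB ≤ c
          · exact absurd (hocc rB hB1 hle) hBfree
          · exact absurd (hA3 rB (by omega) h) hBfree
        · exact h
        · exact absurd (hBocc rA (by omega) h) hA2
      have hfree : pvTemp x rA ∉ file.keys := hA2
      have hcx : file.contains x = true := by
        rw [PySem.Dict.contains_eq_decide_mem_keys]
        simp [hx]
      have hk1 : (file.insert x rA).keys = file.keys :=
        PySem.Dict.keys_insert_of_contains file rA hcx
      have hct : (file.insert x rA).contains (pvTemp x rA) = false := by
        rw [PySem.Dict.contains_eq_decide_mem_keys, hk1]
        simp [hfree]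
      have hk2 : ((file.insert x rA).insert (pvTemp x rA) 0).keys
          = file.keys ++ [pvTemp x rA] := by
        rw [PySem.Dict.keys_insert_of_not_contains _ _ hct, hk1]
      obtain ⟨T1', T2'⟩ := pvRecord_inv file.keys taken (pvTemp x rA) T1 T2
      have hinv' : pvInv ((file.insert x rA).insert (pvTemp x rA) 0)
          (pvRecord taken (pvTemp x rA)) := by
        refine ⟨?_, ?_, ?_, ?_⟩
        · rw [hk2, List.nodup_append]
          refine ⟨hnd, List.nodup_singleton _, ?_⟩
          intro a ha bb hbb
          simp only [List.mem_singleton] at hbb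
          subst hbb
          intro e
          exact hfree (e ▸ ha)
        · intro y cy hy
          rw [PySem.Dict.get?_insert, PySem.Dict.get?_insert] at hy
          by_cases h1 : y = pvTemp x rA
          · rw [if_pos h1] at hy
            obtain rfl : (0 : Int) = cy := Option.some.inj hy
            exact ⟨le_refl 0, fun j hj1 hj2 => absurd hj2 (by omega)⟩
          · rw [if_neg h1] at hy
            by_cases h2 : y = x
            · subst h2
              rw [if_pos rfl] at hy
              obtain rfl : rA = cy := Option.some.inj hy
              refine ⟨by omega, fun j hj1 hj2 => ?_⟩
              rw [hk2]
              rcases lt_trichotomy j (c + 1) with hj | hj | hj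
              · exact List.mem_append_left _ (hocc j hj1 (by omega))
              · rcases eq_or_lt_of_le hj2 with rfl | hlt
                · exact List.mem_append_right _ (by simp)
                · exact List.mem_append_left _ (hA3 j (by omega) hlt)
              · rcases eq_or_lt_of_le hj2 with rfl | hlt
                · exact List.mem_append_right _ (by simp)
                · exact List.mem_append_left _ (hA3 j (by omega) hlt)
            · rw [if_neg h2] at hy
              obtain ⟨h0, hmem⟩ := hvals y cy hy
              exact ⟨h0, fun j a b => by rw [hk2]; exact List.mem_append_left _ (hmem j a b)⟩
        · intro b d hd
          rw [hk2]
          exact T1' b d hd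
        · intro b d hne hdig hmem
          rw [hk2] at hmem
          exact T2' b d hne hdig hmem
      calc pvALoop (x :: rest) file arr
          = pvALoop rest ((file.insert x rA).insert (pvTemp x rA) 0) (arr ++ [pvTemp x rA]) := by
            simp only [pvALoop, hget]
            rw [hrA]
        _ = pvBLoop rest ((file.insert x rA).insert (pvTemp x rA) 0).keys
              (pvRecord taken (pvTemp x rA)) (arr ++ [pvTemp x rA]) := ih _ _ _ hinv'
        _ = pvBLoop (x :: rest) file.keys taken arr := by
            rw [hk2]
            simp only [pvBLoop]
            rw [if_neg (by simp [hx])]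
            rw [← hrB, hreq]
            simp only [pvTemp]
            have hfree' : (x ++ "(" ++ PySem.Int.toStr rA ++ ")") ∉ file.keys := hfree
            rw [pvSet_add_fresh _ _ hfree']
    · have hget : file.get? x = none :=
        (PySem.Dict.get?_eq_none_iff_not_mem_keys file x).mpr hx
      have hcx : file.contains x = false := by
        rw [PySem.Dict.contains_eq_decide_mem_keys]
        simp [hx]
      have hk : (file.insert x 0).keys = file.keys ++ [x] :=
        PySem.Dict.keys_insert_of_not_contains file 0 hcx
      obtain ⟨T1', T2'⟩ := pvRecord_inv file.keys taken x T1 T2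
      have hinv' : pvInv (file.insert x 0) (pvRecord taken x) := by
        refine ⟨?_, ?_, ?_, ?_⟩
        · rw [hk, List.nodup_append]
          refine ⟨hnd, List.nodup_singleton _, ?_⟩
          intro a ha bb hbb
          simp only [List.mem_singleton] at hbb
          subst hbb
          intro e
          exact hx (e ▸ ha)
        · intro y cy hy
          rw [PySem.Dict.get?_insert] at hy
          by_cases h1 : y = x
          · rw [if_pos h1] at hy
            obtain rfl : (0 : Int) = cy := Option.some.inj hy
            exact ⟨le_refl 0, fun j hj1 hj2 => absurd hj2 (by omega)⟩
          · rw [if_neg h1] at hy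
            obtain ⟨h0, hmem⟩ := hvals y cy hy
            exact ⟨h0, fun j a b => by rw [hk]; exact List.mem_append_left _ (hmem j a b)⟩
        · intro b d hd
          rw [hk]
          exact T1' b d hd
        · intro b d hne hdig hmem
          rw [hk] at hmem
          exact T2' b d hne hdig hmem
      calc pvALoop (x :: rest) file arr
          = pvALoop rest (file.insert x 0) (arr ++ [x]) := by simp only [pvALoop, hget]
        _ = pvBLoop rest (file.insert x 0).keys (pvRecord taken x) (arr ++ [x]) :=
            ih _ _ _ hinv'
        _ = pvBLoop (x :: rest) file.keys taken arr := by
            rw [hk]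
            simp only [pvBLoop]
            rw [if_pos hx]
            rw [pvSet_add_fresh _ _ hx]

theorem pv_main (names : List String) : fileNaming names = fileNaming_alt names := by
  have h := pvLoop_eq names PySem.Dict.empty PySem.Dict.empty []
      ⟨by simp [PySem.Dict.keys_empty],
       by intro y c hc; simp [PySem.Dict.get?_empty] at hc,
       by intro b d hd; simp [PySem.Dict.getD, PySem.Dict.get?_empty, PySem.Set.empty] at hd,
       by intro b d _ _ hmem; simp [PySem.Dict.keys_empty] at hmem⟩
  simpa [fileNaming, fileNaming_alt, PySem.Dict.keys_empty, PySem.Set.empty] using h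

-- ===== VERDICT (by name: the statement is the Claim_ definition above) =====
theorem fileNaming_spec : Claim_equal_fileNaming := by
  intro names _
  exact pv_main names
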